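-- pv_equiv track=rewrite | github.com/Alii-isk/PassGen | extender.py | fillSymbols
-- ===== SOURCE A (Python) =====
-- def fillSymbols(foundsSym,line,c,idx):
-- 	_res = []
-- 	if len(foundsSym) > idx:
-- 		for s1 in foundsSym[idx][1].split(","):
-- 			d1 = ""
-- 			if c == None: d1 = line.replace(foundsSym[idx][0],str(s1))
-- 			else: d1 = c.replace(foundsSym[idx][0],str(s1))
--   			#can we go deeper
-- 			if len(foundsSym) > idx + 1:
-- 				[ _res.append(x) for x in fillSymbols(foundsSym,line,d1,idx + 1) ]
-- 			else : _res.append(d1)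
-- 	return _res
-- ===== SOURCE B (Python) =====
-- def fillSymbols(foundsSym, line, c, idx):
--     n = len(foundsSym)
--     if idx >= n:
--         return []
--     start = line if c is None else c
--     results = [start]
--     for sym, vals in foundsSym[idx:]:
--         results = [r.replace(sym, v) for r in results for v in vals.split(",")]
--     return results
-- ===== Notes on version B (the rewrite author's own statement) =====
-- stated objective: idiomatic
-- what changed: Replaces the recursive one-level-at-a-time expansion (recursing with the partially substituted string as c) with a single iterative Cartesian-product fold: start from [base] and for each remaining symbol expand every result by every comma-separated option.
-- outside the precondition, e.g. on fillSymbols([('a', '1,2'), ('b', '3')], 'ab', None, -1): A returns ['13', '23'], B returns ['a3']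
import Mathlib
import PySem

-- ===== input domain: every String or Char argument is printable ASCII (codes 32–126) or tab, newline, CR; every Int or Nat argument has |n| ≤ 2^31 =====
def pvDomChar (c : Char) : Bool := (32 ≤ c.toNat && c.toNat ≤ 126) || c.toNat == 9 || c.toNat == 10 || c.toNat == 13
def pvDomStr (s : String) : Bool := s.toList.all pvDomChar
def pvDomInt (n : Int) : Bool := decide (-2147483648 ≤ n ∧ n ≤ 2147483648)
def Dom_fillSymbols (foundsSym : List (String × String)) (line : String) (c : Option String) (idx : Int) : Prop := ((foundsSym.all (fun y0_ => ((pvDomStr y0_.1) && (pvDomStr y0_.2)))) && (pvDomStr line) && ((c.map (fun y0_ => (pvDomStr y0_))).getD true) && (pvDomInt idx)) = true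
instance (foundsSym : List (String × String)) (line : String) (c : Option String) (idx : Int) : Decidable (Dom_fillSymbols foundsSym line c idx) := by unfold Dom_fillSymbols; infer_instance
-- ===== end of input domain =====

-- B replaces A's recursion with one iterative Cartesian-product fold; return value only, no mutation.

-- ===== PORT A =====
def fillSymbols (foundsSym : List (String × String)) (line : String) (c : Option String) (idx : Int) : List String :=
  if h : (foundsSym.length : Int) > idx then
    (((PySem.Str.split? (PySem.List.pyGetD foundsSym idx ("", "")).2 ",").getD [])).foldl
      (fun res s1 =>
        let d1 : String :=
          match c with
          | none => PySem.Str.replace line (PySem.List.pyGetD foundsSym idx ("", "")).1 s1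
          | some cv => PySem.Str.replace cv (PySem.List.pyGetD foundsSym idx ("", "")).1 s1
        if (foundsSym.length : Int) > idx + 1 then
          res ++ fillSymbols foundsSym line (some d1) (idx + 1)
        else
          res ++ [d1]) []
  else []
termination_by ((foundsSym.length : Int) - idx).toNat
decreasing_by omega

-- ===== PORT B =====
-- one expansion step of B's comprehension: [r.replace(sym, v) for r in results for v in vals.split(",")]
def fsStep (results : List String) (p : String × String) : List String :=
  results.flatMap (fun r => (((PySem.Str.split? p.2 ",").getD [])).map (fun v => PySem.Str.replace r p.1 v))

def fillSymbols_alt (foundsSym : List (String × String)) (line : String) (c : Option String) (idx : Int) : List String :=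
  if idx ≥ (foundsSym.length : Int) then []
  else
    let start : String :=
      match c with
      | none => line
      | some cv => cv
    (PySem.List.slice foundsSym (some idx) none).foldl fsStep [start]

-- ===== PRECONDITION & SPEC =====
-- Pre_ restricts to the function's natural domain 0 ≤ idx (the recursion starts at 0 and only
-- increments): for negative idx A either raises IndexError (idx < -len) or accidentally
-- negative-index-wraps and then re-expands the same symbols twice.
def Pre_fillSymbols (foundsSym : List (String × String)) (line : String) (c : Option String) (idx : Int) : Prop := 0 ≤ idx
instance (foundsSym : List (String × String)) (line : String) (c : Option String) (idx : Int) : Decidable (Pre_fillSymbols foundsSym line c idx) := by unfold Pre_fillSymbols; infer_instance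
def pvWitness_fillSymbols : (List (String × String)) × String × Option String × Int :=
  ([("a", "1,2"), ("b", "3,4")], "a-b", none, 0)

def Spec_fillSymbols (foundsSym : List (String × String)) (line : String) (c : Option String) (idx : Int) (out : List String) : Prop := out = fillSymbols_alt foundsSym line c idx
instance (foundsSym : List (String × String)) (line : String) (c : Option String) (idx : Int) (out : List String) : Decidable (Spec_fillSymbols foundsSym line c idx out) := by unfold Spec_fillSymbols; infer_instance

-- ===== CLAIM (what is proved, stated in full; the proofs are below) =====
def Claim_equal_fillSymbols : Prop := ∀ (foundsSym : List (String × String)) (line : String) (c : Option String) (idx : Int), Dom_fillSymbols foundsSym line c idx → Pre_fillSymbols foundsSym line c idx → Spec_fillSymbols foundsSym line c idx (fillSymbols foundsSym line c idx)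

-- ===== LEMMAS AND PROOFS =====

theorem fsStep_append (l1 l2 : List String) (p : String × String) :
    fsStep (l1 ++ l2) p = fsStep l1 p ++ fsStep l2 p := by
  simp [fsStep]

theorem foldl_fsStep_append (rest : List (String × String)) (l1 l2 : List String) :
    rest.foldl fsStep (l1 ++ l2) = rest.foldl fsStep l1 ++ rest.foldl fsStep l2 := by
  induction rest generalizing l1 l2 with
  | nil => rfl
  | cons p t ih => simp only [List.foldl_cons, fsStep_append, ih]

theorem foldl_fsStep_flatMap (rest : List (String × String)) (xs : List String) :
    rest.foldl fsStep xs = xs.flatMap (fun x => rest.foldl fsStep [x]) := by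
  induction xs with
  | nil =>
      induction rest with
      | nil => rfl
      | cons p t ih => simpa [fsStep] using ih
  | cons a l ih =>
      have : (a :: l) = [a] ++ l := rfl
      rw [this, foldl_fsStep_append, ih]
      simp

theorem foldl_append_of_body {α β : Type} (body : List β → α → List β) (g : α → List β)
    (h : ∀ res x, body res x = res ++ g x) :
    ∀ (L : List α) (init : List β), L.foldl body init = init ++ L.flatMap g := by
  intro L
  induction L with
  | nil => intro init; simp
  | cons a t ih => intro init; rw [List.foldl_cons, h, ih]; simp

theorem fillSymbols_char (k : Nat) :
    ∀ (foundsSym : List (String × String)) (line : String) (c : Option String) (idx : Int),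
      0 ≤ idx → idx < (foundsSym.length : Int) → (foundsSym.length - idx.toNat) = k →
      fillSymbols foundsSym line c idx =
        (foundsSym.drop idx.toNat).foldl fsStep [c.getD line] := by
  induction k with
  | zero =>
      intro f line c idx h0 hlt hk
      omega
  | succ k ih =>
      intro f line c idx h0 hlt hk
      have hidx : idx.toNat < f.length := by omega
      have hget : PySem.List.pyGetD f idx ("", "") = f[idx.toNat] :=
        PySem.List.pyGetD_eq_getElem f ("", "") h0 hlt
      have hdrop : f.drop idx.toNat = f[idx.toNat] :: f.drop (idx.toNat + 1) :=
        List.drop_eq_getElem_cons hidx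
      rw [fillSymbols]
      rw [dif_pos hlt]
      refine Eq.trans (foldl_append_of_body _
        (fun s1 =>
          if (f.length : Int) > idx + 1 then
            fillSymbols f line (some (match c with
              | none => PySem.Str.replace line (PySem.List.pyGetD f idx ("", "")).1 s1
              | some cv => PySem.Str.replace cv (PySem.List.pyGetD f idx ("", "")).1 s1)) (idx + 1)
          else
            [(match c with
              | none => PySem.Str.replace line (PySem.List.pyGetD f idx ("", "")).1 s1
              | some cv => PySem.Str.replace cv (PySem.List.pyGetD f idx ("", "")).1 s1)])
        (by
          intro res s1
          cases c <;> by_cases hd : (f.length : Int) > idx + 1 <;>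
            simp only [hd, if_true, if_false]) _ []) ?_
      simp only [List.nil_append, hget]
      by_cases hdeep : (f.length : Int) > idx + 1
      · -- deeper levels remain
        have hnat : (idx + 1).toNat = idx.toNat + 1 := by omega
        have ihcall : ∀ d1 : String,
            fillSymbols f line (some d1) (idx + 1) =
              (f.drop (idx.toNat + 1)).foldl fsStep [d1] := by
          intro d1
          have := ih f line (some d1) (idx + 1) (by omega) hdeep (by omega)
          simpa [hnat] using this
        simp only [if_pos hdeep, ihcall]
        rw [hdrop]
        simp only [List.foldl_cons]
        have hstep : fsStep [c.getD line] f[idx.toNat] =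
            (((PySem.Str.split? f[idx.toNat].2 ",").getD [])).map
              (fun v => PySem.Str.replace (c.getD line) f[idx.toNat].1 v) := by
          simp [fsStep]
        rw [hstep, foldl_fsStep_flatMap, List.flatMap_map]
        cases c <;> rfl
      · -- last level
        have hone : f.drop idx.toNat = [f[idx.toNat]] := by
          rw [hdrop]
          have : f.drop (idx.toNat + 1) = [] := by
            apply List.drop_eq_nil_of_le; omega
          rw [this]
        simp only [if_neg hdeep, hone, List.foldl_cons, List.foldl_nil]
        cases c <;> simp [fsStep, ← List.map_eq_flatMap]

-- ===== VERDICT (by name: the statement is the Claim_ definition above) =====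
theorem fillSymbols_spec : Claim_equal_fillSymbols := by
  intro f line c idx _hdom hpre
  unfold Spec_fillSymbols fillSymbols_alt
  by_cases hge : idx ≥ (f.length : Int)
  · rw [if_pos hge, fillSymbols, dif_neg (by omega)]
  · rw [if_neg hge]
    have hlt : idx < (f.length : Int) := by omega
    have := fillSymbols_char (f.length - idx.toNat) f line c idx hpre hlt rfl
    rw [this, PySem.List.slice_from f hpre]
    cases c <;> rfl
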